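-- pv_equiv track=rewrite | github.com/cmlblbn/Emlak_Yorumlari.com | slang-bad_words/helper.py | getEndtoEndLongestString
-- ===== SOURCE A (Python) =====
-- def getEndtoEndLongestString(string):
--     longest = ""
--     for i in range(len(string)):
--         head = string[i:i+3]
--         for j in range(i+4,len(string)):
--             tail = string[j:j+3]
--             if(head == tail):
--                 result = string[i:j+3]
--                 if(len(result)>=len(longest)):
--                     longest = result
--     return longest
-- ===== SOURCE B (Python) =====
-- def getEndtoEndLongestString(string):
--     # One pass over all 3-gram start positions: remember the first occurrence of
--     # each 3-gram in a dict; at each later occurrence j the best candidate that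
--     # ends at j starts at that first occurrence.
--     first = {}
--     best = ""
--     for j in range(len(string) - 2):
--         g = string[j:j+3]
--         i = first.setdefault(g, j)
--         if j - i >= 4:
--             cand = string[i:j+3]
--             if len(cand) >= len(best):
--                 best = cand
--     return best
-- ===== Notes on version B (the rewrite author's own statement) =====
-- stated objective: faster
-- what changed: Replaces the nested scan over all start/end pairs by a single left-to-right pass that records the first occurrence of every 3-gram in a dict and, at each later occurrence, takes the substring from that first occurrence as the candidate.
import Mathlib
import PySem

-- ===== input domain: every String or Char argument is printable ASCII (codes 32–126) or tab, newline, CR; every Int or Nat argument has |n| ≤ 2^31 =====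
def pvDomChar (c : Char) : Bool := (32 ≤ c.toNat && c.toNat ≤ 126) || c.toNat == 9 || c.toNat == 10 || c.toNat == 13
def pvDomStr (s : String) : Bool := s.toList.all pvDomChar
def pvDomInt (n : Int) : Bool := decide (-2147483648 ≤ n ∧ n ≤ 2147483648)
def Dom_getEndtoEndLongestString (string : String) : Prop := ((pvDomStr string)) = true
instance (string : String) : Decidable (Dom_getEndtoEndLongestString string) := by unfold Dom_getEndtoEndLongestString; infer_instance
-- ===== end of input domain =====

-- B replaces A's quadratic scan over all (start, end) pairs by a single pass that
-- records the first occurrence of each 3-gram in a dict (objective: faster).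

-- ===== PORT A =====
def getEndtoEndLongestString (string : String) : String :=
  let s := string.toList
  let n : Int := s.length
  let longest := (PySem.List.pyRange 0 n 1).foldl (fun longest i =>
    let head := PySem.List.slice s (some i) (some (i+3))
    (PySem.List.pyRange (i+4) n 1).foldl (fun longest j =>
      let tail := PySem.List.slice s (some j) (some (j+3))
      if head = tail then
        let result := PySem.List.slice s (some i) (some (j+3))
        if result.length ≥ longest.length then result else longest
      else longest) longest) ([] : List Char)
  String.ofList longest

-- ===== PORT B =====
def getEndtoEndLongestString_alt (string : String) : String :=
  let s := string.toList
  let n : Int := s.length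
  let res := (PySem.List.pyRange 0 (n-2) 1).foldl
    (fun (st : PySem.Dict (List Char) Int × List Char) j =>
      let g := PySem.List.slice s (some j) (some (j+3))
      let i := st.1.getD g j
      let first := st.1.setdefault g j
      if j - i ≥ 4 then
        let cand := PySem.List.slice s (some i) (some (j+3))
        if cand.length ≥ st.2.length then (first, cand) else (first, st.2)
      else (first, st.2)) (PySem.Dict.empty, ([] : List Char))
  String.ofList res.2

-- ===== PRECONDITION & SPEC =====
def Spec_getEndtoEndLongestString (string : String) (out : String) : Prop := out = getEndtoEndLongestString_alt string
instance (string : String) (out : String) : Decidable (Spec_getEndtoEndLongestString string out) := by unfold Spec_getEndtoEndLongestString; infer_instance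

-- ===== CLAIM (what is proved, stated in full; the proofs are below) =====
def Claim_equal_getEndtoEndLongestString : Prop := ∀ (string : String), Dom_getEndtoEndLongestString string → Spec_getEndtoEndLongestString string (getEndtoEndLongestString string)

-- ===== LEMMAS AND PROOFS =====

-- the 3-gram starting at i, the candidate substring for the pair (i, j), and the
-- 'keep the longer (ties: newer)' accumulator step shared by both programs
def gramN (s : List Char) (i : Nat) : List Char := (s.drop i).take 3
def valN (s : List Char) (p : Nat × Nat) : List Char := (s.drop p.1).take (p.2 + 3 - p.1)
def stepL (b c : List Char) : List Char := if c.length ≥ b.length then c else b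

-- pairs (i, j) that A's double loop accepts, in A's iteration order
def ValidP (s : List Char) (p : Nat × Nat) : Prop :=
  p.1 + 4 ≤ p.2 ∧ p.2 < s.length ∧ gramN s p.1 = gramN s p.2

def pairsA (s : List Char) : List (Nat × Nat) :=
  (List.range s.length).flatMap (fun i =>
    ((List.range' (i+4) (s.length - (i+4))).filter
      (fun j => decide (gramN s i = gramN s j))).map (fun j => (i, j)))

-- positions < m whose 3-gram is g, in order; first occurrence of the 3-gram at j
def occs (s : List Char) (g : List Char) (m : Nat) : List Nat :=
  (List.range m).filter (fun p => decide (gramN s p = g))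
def firstO (s : List Char) (j : Nat) : Nat := ((occs s (gramN s j) (j+1)).head?).getD j

-- pairs B's single loop accepts, in B's iteration order
def pairsB (s : List Char) (m : Nat) : List (Nat × Nat) :=
  (List.range m).filterMap (fun j =>
    if firstO s j + 4 ≤ j then some (firstO s j, j) else none)

-- B's loop body, after the Int range has been replaced by a Nat range
def stepB (s : List Char) (st : PySem.Dict (List Char) Int × List Char) (j : Nat) :
    PySem.Dict (List Char) Int × List Char :=
  let g := PySem.List.slice s (some (j : Int)) (some ((j : Int)+3))
  let i := st.1.getD g (j : Int)
  let first := st.1.setdefault g (j : Int)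
  if (j : Int) - i ≥ 4 then
    let cand := PySem.List.slice s (some i) (some ((j : Int)+3))
    if cand.length ≥ st.2.length then (first, cand) else (first, st.2)
  else (first, st.2)

lemma length_gramN (s : List Char) (i : Nat) : (gramN s i).length = min 3 (s.length - i) := by
  simp [gramN]

lemma valid_j3 {s : List Char} {p : Nat × Nat} (h : ValidP s p) : p.2 + 3 ≤ s.length := by
  obtain ⟨h1, h2, h3⟩ := h
  have := congrArg List.length h3
  rw [length_gramN, length_gramN] at this
  omega

lemma length_valN {s : List Char} {p : Nat × Nat} (h : ValidP s p) :
    (valN s p).length = p.2 + 3 - p.1 := by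
  have := valid_j3 h
  have h1 := h.1
  simp [valN]
  omega

-- fold lemmas for stepL: the accumulator keeps the last candidate attaining the running maximum length
lemma foldl_stepL_lt {l : List (List Char)} {b : List Char}
    (h : ∀ c ∈ l, c.length < b.length) : l.foldl stepL b = b := by
  induction l with
  | nil => rfl
  | cons c t ih =>
    have hc := h c (by simp)
    simp only [List.foldl_cons, stepL]
    rw [if_neg (by omega)]
    exact ih (fun c hc => h c (by simp [hc]))

lemma foldl_stepL_mem (l : List (List Char)) (b : List Char) :
    l.foldl stepL b = b ∨ l.foldl stepL b ∈ l := by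
  induction l generalizing b with
  | nil => left; rfl
  | cons c t ih =>
    simp only [List.foldl_cons]
    rcases ih (stepL b c) with h | h
    · rw [h]; unfold stepL
      split
      · right; simp
      · left; rfl
    · right; simp [h]

lemma foldl_stepL_split {l1 l2 : List (List Char)} {c b : List Char}
    (h1 : ∀ y ∈ l1, y.length ≤ c.length) (hb : b.length ≤ c.length)
    (h2 : ∀ y ∈ l2, y.length < c.length) :
    (l1 ++ c :: l2).foldl stepL b = c := by
  rw [List.foldl_append]
  have hstate : (l1.foldl stepL b).length ≤ c.length := by
    rcases foldl_stepL_mem l1 b with h | h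
    · rw [h]; exact hb
    · exact h1 _ h
  rw [List.foldl_cons]
  have h3 : stepL (List.foldl stepL b l1) c = c := by
    unfold stepL; exact if_pos hstate
  rw [h3]
  exact foldl_stepL_lt h2

lemma mem_pairsA {s : List Char} {p : Nat × Nat} : p ∈ pairsA s ↔ ValidP s p := by
  obtain ⟨i, j⟩ := p
  simp only [pairsA, List.mem_flatMap, List.mem_map, List.mem_filter, List.mem_range,
    List.mem_range', ValidP, decide_eq_true_eq]
  constructor
  · rintro ⟨a, ha, j', ⟨⟨⟨k, hk, rfl⟩, hg⟩, h⟩⟩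
    injection h with h1 h2
    subst h1; subst h2
    exact ⟨by omega, by omega, hg⟩
  · rintro ⟨h1, h2, h3⟩
    exact ⟨i, by omega, j, ⟨⟨j - (i+4), by omega, by omega⟩, h3⟩, rfl⟩

lemma pairwise_pairsA (s : List Char) :
    (pairsA s).Pairwise (fun p q => p.1 < q.1 ∨ (p.1 = q.1 ∧ p.2 < q.2)) := by
  unfold pairsA
  rw [List.pairwise_flatMap]
  constructor
  · intro a _
    apply List.Pairwise.map
    · intro x y hxy
      right; exact ⟨rfl, hxy⟩
    · apply List.Pairwise.filter
      rw [List.range'_eq_map_range]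
      exact List.Pairwise.map _ (fun x y h => by omega) List.pairwise_lt_range
  · apply List.Pairwise.imp ?_ (List.pairwise_lt_range)
    intro a b hab x hx y hy
    simp only [List.mem_map] at hx hy
    obtain ⟨x', _, rfl⟩ := hx
    obtain ⟨y', _, rfl⟩ := hy
    left; exact hab

lemma firstO_spec (s : List Char) (j : Nat) :
    firstO s j ≤ j ∧ gramN s (firstO s j) = gramN s j ∧
      ∀ i, gramN s i = gramN s j → firstO s j ≤ i := by
  have hmem : j ∈ occs s (gramN s j) (j+1) := by
    simp [occs, List.mem_filter, List.mem_range]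
  have hne : occs s (gramN s j) (j+1) ≠ [] := List.ne_nil_of_mem hmem
  have hhead : (occs s (gramN s j) (j+1)).head? = some ((occs s (gramN s j) (j+1)).head hne) :=
    List.head?_eq_some_head hne
  set h0 := (occs s (gramN s j) (j+1)).head hne with hh0
  have hfo : firstO s j = h0 := by simp [firstO, hhead]
  have hmem0 : h0 ∈ occs s (gramN s j) (j+1) := List.head_mem hne
  have hprop : gramN s h0 = gramN s j ∧ h0 < j + 1 := by
    have := hmem0
    simp only [occs, List.mem_filter, List.mem_range, decide_eq_true_eq] at this
    exact ⟨this.2, this.1⟩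
  refine hfo ▸ ⟨by omega, hprop.1, ?_⟩
  intro i hi
  by_contra hlt
  have hi' : i ∈ occs s (gramN s j) (j+1) := by
    simp only [occs, List.mem_filter, List.mem_range, decide_eq_true_eq]
    constructor
    · omega
    · exact hi
  have hsorted : (occs s (gramN s j) (j+1)).Pairwise (· < ·) :=
    (List.pairwise_lt_range).filter _
  rw [← List.cons_head_tail hne] at hsorted hi'
  rw [List.pairwise_cons] at hsorted
  rcases List.mem_cons.mp hi' with rfl | hmemtail
  · omega
  · exact absurd (hsorted.1 i hmemtail) (by omega)

lemma mem_pairsB {s : List Char} {m : Nat} {p : Nat × Nat} :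
    p ∈ pairsB s m ↔ p.2 < m ∧ p.1 = firstO s p.2 ∧ p.1 + 4 ≤ p.2 := by
  obtain ⟨i, j⟩ := p
  simp only [pairsB, List.mem_filterMap, List.mem_range]
  constructor
  · rintro ⟨j', hj', h⟩
    split at h
    · injection h with h1
      injection h1 with ha hb
      subst hb; subst ha
      exact ⟨hj', rfl, by assumption⟩
    · exact absurd h (by simp)
  · rintro ⟨h1, rfl, h3⟩
    exact ⟨j, h1, by rw [if_pos h3]⟩

lemma pairwise_pairsB (s : List Char) (m : Nat) :
    (pairsB s m).Pairwise (fun p q => p.2 < q.2) := by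
  apply List.Pairwise.filterMap _ ?_ (List.pairwise_lt_range (n := m))
  intro a b hab x hx y hy
  split at hx <;> split at hy <;> first | (cases hx; cases hy; simpa using hab) | simp_all

lemma gram_slice (s : List Char) (m : Nat) :
    PySem.List.slice s (some (m:Int)) (some ((m:Int)+3)) = gramN s m := by
  have e : ((m:Int) + 3) = (((m+3 : Nat)) : Int) := by push_cast; ring
  rw [e, PySem.List.slice_natCast]
  simp [gramN]

lemma occs_succ (s : List Char) (g : List Char) (m : Nat) :
    occs s g (m+1) = occs s g m ++ if gramN s m = g then [m] else [] := by
  unfold occs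
  rw [List.range_succ, List.filter_append]
  congr 1
  split <;> simp_all

lemma firstO_eq_of_head? {s : List Char} {m p : Nat}
    (h : (occs s (gramN s m) m).head? = some p) : firstO s m = p := by
  unfold firstO
  rw [occs_succ, if_pos rfl, List.head?_append, h]
  rfl

lemma firstO_eq_self_of_none {s : List Char} {m : Nat}
    (h : (occs s (gramN s m) m).head? = none) : firstO s m = m := by
  unfold firstO
  rw [occs_succ, if_pos rfl, List.head?_append, h]
  rfl

lemma pairsB_succ (s : List Char) (m : Nat) :
    pairsB s (m+1) = pairsB s m ++
      if firstO s m + 4 ≤ m then [(firstO s m, m)] else [] := by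
  unfold pairsB
  rw [List.range_succ, List.filterMap_append]
  congr 1
  split <;> simp_all

lemma A_eq (string : String) :
    getEndtoEndLongestString string =
      String.ofList (((pairsA string.toList).map (valN string.toList)).foldl stepL []) := by
  unfold getEndtoEndLongestString
  set s := string.toList with hs
  simp only
  congr 1
  rw [PySem.List.pyRange_zero_natCast, List.foldl_map]
  unfold pairsA
  rw [List.map_flatMap, List.foldl_flatMap]
  apply PySem.List.foldl_congr_mem
  intro acc i hi
  have hr : PySem.List.pyRange ((i : Int)+4) ((s.length : Nat) : Int) 1 =
      (List.range (s.length - (i+4))).map (fun k => (((i+4+k : Nat)) : Int)) := by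
    rw [PySem.List.pyRange_one]
    have h2 : ((s.length : Int) - ((i : Int)+4)).toNat = s.length - (i+4) := by omega
    rw [h2]
    apply List.map_congr_left
    intro k _
    push_cast
    ring
  rw [hr, List.foldl_map]
  have hbody : ∀ (acc : List Char), ∀ k ∈ List.range (s.length - (i+4)),
      (if PySem.List.slice s (some (i:Int)) (some ((i:Int) + 3)) =
            PySem.List.slice s (some (((i+4+k:Nat)):Int)) (some ((((i+4+k:Nat)):Int) + 3)) then
        if (PySem.List.slice s (some (i:Int)) (some ((((i+4+k:Nat)):Int) + 3))).length ≥ acc.length then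
          PySem.List.slice s (some (i:Int)) (some ((((i+4+k:Nat)):Int) + 3))
        else acc
      else acc) =
      (if gramN s i = gramN s (i+4+k) then stepL acc (valN s (i, i+4+k)) else acc) := by
    intro acc k hk
    have e1 : ((i:Int) + 3) = (((i+3 : Nat)) : Int) := by push_cast; ring
    have e2 : (((i+4+k:Nat):Int) + 3) = (((i+4+k+3 : Nat)) : Int) := by push_cast; ring
    rw [e1, e2, PySem.List.slice_natCast, PySem.List.slice_natCast, PySem.List.slice_natCast]
    have g1 : List.take (i+3-i) (List.drop i s) = gramN s i := by simp [gramN]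
    have g2 : List.take (i+4+k+3-(i+4+k)) (List.drop (i+4+k) s) = gramN s (i+4+k) := by
      simp [gramN]
    rw [g1, g2]
    rfl
  rw [PySem.List.foldl_congr_mem _ _ _ _ hbody,
      PySem.List.foldl_ite_eq_foldl_filter (p := fun k => gramN s i = gramN s (i+4+k))
        (f := fun acc k => stepL acc (valN s (i, i+4+k)))]
  rw [List.range'_eq_map_range, List.filter_map, List.foldl_map]
  simp only [List.foldl_map]
  rfl

lemma B_inv (s : List Char) (m : Nat) :
    ((List.range m).foldl (stepB s) (PySem.Dict.empty, [])).2 =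
        ((pairsB s m).map (valN s)).foldl stepL []
    ∧ ∀ g, ((List.range m).foldl (stepB s) (PySem.Dict.empty, [])).1.get? g =
        ((occs s g m).head?).map (fun (p : Nat) => (p : Int)) := by
  induction m with
  | zero =>
    constructor
    · rfl
    · intro g; rfl
  | succ m ih =>
    obtain ⟨ih1, ih2⟩ := ih
    rw [List.range_succ, List.foldl_append, List.foldl_cons, List.foldl_nil]
    set st := (List.range m).foldl (stepB s) (PySem.Dict.empty, []) with hst
    show (stepB s st m).2 = _ ∧ ∀ g, (stepB s st m).1.get? g = _
    unfold stepB
    simp only [gram_slice]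
    rcases hh : (occs s (gramN s m) m).head? with _ | p
    · -- 3-gram at m not seen before
      have hget : st.1.get? (gramN s m) = none := by rw [ih2, hh]; rfl
      have hgetD : st.1.getD (gramN s m) (m:Int) = (m:Int) := by
        rw [PySem.Dict.getD_eq_get?_getD, hget]; rfl
      have hcont : st.1.contains (gramN s m) = false := by
        rw [PySem.Dict.contains_eq_isSome_get?, hget]; rfl
      have hsd : st.1.setdefault (gramN s m) (m:Int) = st.1.insert (gramN s m) (m:Int) :=
        PySem.Dict.setdefault_of_not_contains _ _ hcont
      rw [hgetD, hsd, if_neg (by omega)]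
      constructor
      · -- snd unchanged; pairsB unchanged since firstO s m = m
        show st.2 = _
        rw [pairsB_succ, if_neg (by have := firstO_eq_self_of_none hh; omega)]
        simpa using ih1
      · intro g'
        show (st.1.insert (gramN s m) (m:Int)).get? g' = _
        by_cases hg : g' = gramN s m
        · subst hg
          rw [PySem.Dict.get?_insert_self, occs_succ, if_pos rfl, List.head?_append, hh]
          rfl
        · rw [PySem.Dict.get?_insert_of_ne _ _ hg, ih2, occs_succ, if_neg (fun h => hg h.symm),
              List.append_nil]
    · -- first occurrence p < m already in the dict
      have hget : st.1.get? (gramN s m) = some (p:Int) := by rw [ih2, hh]; rfl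
      have hgetD : st.1.getD (gramN s m) (m:Int) = (p:Int) := by
        rw [PySem.Dict.getD_eq_get?_getD, hget]; rfl
      have hcont : st.1.contains (gramN s m) = true := by
        rw [PySem.Dict.contains_eq_isSome_get?, hget]; rfl
      have hsd : st.1.setdefault (gramN s m) (m:Int) = st.1 :=
        PySem.Dict.setdefault_of_contains _ _ hcont
      have hfo : firstO s m = p := firstO_eq_of_head? hh
      have hdict : ∀ g', (st.1.setdefault (gramN s m) (m:Int)).get? g' =
          ((occs s g' (m+1)).head?).map (fun (q : Nat) => (q : Int)) := by
        intro g'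
        rw [hsd, ih2, occs_succ]
        by_cases hg : gramN s m = g'
        · rw [if_pos hg, List.head?_append]
          rw [← hg, hh]
          rfl
        · rw [if_neg hg, List.append_nil]
      rw [hgetD]
      by_cases hcond : p + 4 ≤ m
      · rw [if_pos (by omega)]
        have hcand : PySem.List.slice s (some (p:Int)) (some ((m:Int)+3)) = valN s (p, m) := by
          have e : ((m:Int) + 3) = (((m+3 : Nat)) : Int) := by push_cast; ring
          rw [e, PySem.List.slice_natCast]
          rfl
        rw [hcand]
        constructor
        · rw [apply_ite Prod.snd]
          show (if (valN s (p,m)).length ≥ st.2.length then valN s (p,m) else st.2) = _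
          rw [pairsB_succ, hfo, if_pos hcond, List.map_append, List.foldl_append, ih1]
          simp only [List.map_cons, List.map_nil, List.foldl_cons, List.foldl_nil]
          rfl
        · intro g'
          rw [apply_ite Prod.fst, ite_self]
          exact hdict g'
      · rw [if_neg (by omega)]
        constructor
        · show st.2 = _
          rw [pairsB_succ, hfo, if_neg hcond, List.append_nil, ih1]
        · exact hdict

lemma B_eq (string : String) :
    getEndtoEndLongestString_alt string =
      String.ofList (((pairsB string.toList (string.toList.length - 2)).map
        (valN string.toList)).foldl stepL []) := by
  unfold getEndtoEndLongestString_alt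
  set s := string.toList with hs
  simp only
  congr 1
  rw [← (B_inv s (s.length - 2)).1]
  congr 1
  have hr : PySem.List.pyRange 0 ((s.length : Int) - 2) 1 =
      (List.range (s.length - 2)).map (fun (k : Nat) => (k : Int)) := by
    rw [PySem.List.pyRange_one]
    have h2 : ((s.length : Int) - 2 - 0).toNat = s.length - 2 := by omega
    rw [h2]
    apply List.map_congr_left
    intro k _
    simp
  rw [hr, List.foldl_map]
  rfl

lemma valid_of_mem_pairsB {s : List Char} {p : Nat × Nat}
    (hp : p ∈ pairsB s (s.length - 2)) : ValidP s p := by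
  obtain ⟨h1, h2, h3⟩ := mem_pairsB.mp hp
  refine ⟨h3, by omega, ?_⟩
  rw [h2]
  exact (firstO_spec s p.2).2.1

-- existence of the maximal pair: M = the largest j - i over valid pairs, J = the largest
-- end position among valid pairs of weight M
lemma exists_maxpair (s : List Char) (p0 : Nat × Nat) (h0 : ValidP s p0) :
    ∃ M J, (∀ p, ValidP s p → p.2 - p.1 ≤ M) ∧
           (∀ p, ValidP s p → p.2 - p.1 = M → p.2 ≤ J) ∧
           (∃ q, ValidP s q ∧ q.2 - q.1 = M ∧ q.2 = J) := by
  haveI : DecidablePred (fun p : Nat × Nat => ValidP s p) := fun p => by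
    unfold ValidP; infer_instance
  have memV : ∀ p, p ∈ (Finset.range s.length ×ˢ Finset.range s.length).filter
      (fun p => ValidP s p) ↔ ValidP s p := by
    intro p
    rw [Finset.mem_filter, Finset.mem_product, Finset.mem_range, Finset.mem_range]
    exact ⟨fun h => h.2, fun h => ⟨⟨by have := h.1; have := h.2.1; omega, h.2.1⟩, h⟩⟩
  obtain ⟨qM, hqM_mem, hqM_max⟩ := Finset.exists_max_image _ (fun p : Nat × Nat => p.2 - p.1)
    ⟨p0, (memV p0).mpr h0⟩
  obtain ⟨qJ, hqJ_mem, hqJ_max⟩ := Finset.exists_max_image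
    (((Finset.range s.length ×ˢ Finset.range s.length).filter (fun p => ValidP s p)).filter
      (fun p => p.2 - p.1 = qM.2 - qM.1)) Prod.snd
    ⟨qM, Finset.mem_filter.mpr ⟨hqM_mem, rfl⟩⟩
  obtain ⟨hqJ_V, hqJ_w⟩ := Finset.mem_filter.mp hqJ_mem
  refine ⟨qM.2 - qM.1, qJ.2, ?_, ?_, qJ, (memV qJ).mp hqJ_V, hqJ_w, rfl⟩
  · exact fun p hp => hqM_max p ((memV p).mpr hp)
  · intro p hp hpM
    exact hqJ_max p (Finset.mem_filter.mpr ⟨(memV p).mpr hp, hpM⟩)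

lemma main_eq (s : List Char) :
    ((pairsA s).map (valN s)).foldl stepL [] =
      ((pairsB s (s.length - 2)).map (valN s)).foldl stepL [] := by
  by_cases hA : pairsA s = []
  · have hB : pairsB s (s.length - 2) = [] := by
      rw [List.eq_nil_iff_forall_not_mem]
      intro p hp
      exact (List.eq_nil_iff_forall_not_mem.mp hA) p (mem_pairsA.mpr (valid_of_mem_pairsB hp))
    rw [hA, hB]
  · obtain ⟨p0, hp0⟩ := List.exists_mem_of_ne_nil _ hA
    obtain ⟨M, J, hM_le, hJ_le, ⟨q1, q2⟩, hqv, hqM, hqJ⟩ :=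
      exists_maxpair s p0 (mem_pairsA.mp hp0)
    simp only at hqM hqJ
    have h14 : q1 + 4 ≤ q2 := hqv.1
    have hq1 : q1 = J - M := by omega
    have hvIJ : ValidP s (J - M, J) := by rwa [hq1, hqJ] at hqv
    -- candidate lengths
    have hlen : ∀ p, ValidP s p → (valN s p).length = (p.2 - p.1) + 3 := by
      intro p hp
      rw [length_valN hp]
      have := hp.1
      omega
    have hlenIJ : (valN s (J - M, J)).length = M + 3 := by
      rw [hlen _ hvIJ]
      simp only
      omega
    have hle : ∀ p, ValidP s p → (valN s p).length ≤ M + 3 := by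
      intro p hp
      rw [hlen p hp]
      have := hM_le p hp
      omega
    -- strictness for pairs coming after (J-M, J) in either order
    have hstrictA : ∀ p, ValidP s p →
        ((J - M) < p.1 ∨ ((J - M) = p.1 ∧ J < p.2)) → (valN s p).length < M + 3 := by
      intro p hp hlex
      rw [hlen p hp]
      have hwle := hM_le p hp
      have h14' := hp.1
      rcases Nat.lt_or_ge (p.2 - p.1) M with h | h
      · omega
      · have hwM : p.2 - p.1 = M := by omega
        have hJle := hJ_le p hp hwM
        omega
    have hstrictB : ∀ p, ValidP s p → J < p.2 → (valN s p).length < M + 3 := by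
      intro p hp hJlt
      rw [hlen p hp]
      have hwle := hM_le p hp
      have h14' := hp.1
      rcases Nat.lt_or_ge (p.2 - p.1) M with h | h
      · omega
      · have hJle := hJ_le p hp (by omega)
        omega
    -- A-side decomposition around (J-M, J)
    obtain ⟨l1, l2, hsplit⟩ := List.append_of_mem (mem_pairsA.mpr hvIJ)
    have hpwA := pairwise_pairsA s
    rw [hsplit] at hpwA
    have hafterA : ∀ y ∈ l2, (J - M) < y.1 ∨ ((J - M) = y.1 ∧ J < y.2) :=
      (List.pairwise_cons.mp (List.pairwise_append.mp hpwA).2.1).1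
    have hmemA' : ∀ y, y ∈ l1 ∨ y ∈ l2 → ValidP s y := by
      intro y hy
      apply mem_pairsA.mp
      rw [hsplit]
      rcases hy with h | h
      · exact List.mem_append_left _ h
      · exact List.mem_append_right _ (List.mem_cons_of_mem _ h)
    rw [hsplit, List.map_append, List.map_cons]
    rw [foldl_stepL_split
      (fun c hc => by
        obtain ⟨y, hy, rfl⟩ := List.mem_map.mp hc
        rw [hlenIJ]
        exact hle y (hmemA' y (Or.inl hy)))
      (by simp)
      (fun c hc => by
        obtain ⟨y, hy, rfl⟩ := List.mem_map.mp hc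
        rw [hlenIJ]
        exact hstrictA y (hmemA' y (Or.inr hy)) (hafterA y hy))]
    -- B-side decomposition around (J-M, J)
    have hfoJ : firstO s J = J - M := by
      obtain ⟨hle', hgram, hmin⟩ := firstO_spec s J
      have h1 : firstO s J ≤ J - M := hmin _ hvIJ.2.2
      have h2 : ValidP s (firstO s J, J) := ⟨by omega, hvIJ.2.1, hgram⟩
      have h3 := hM_le _ h2
      simp only at h3
      omega
    have hmemB : (J - M, J) ∈ pairsB s (s.length - 2) := by
      apply mem_pairsB.mpr
      refine ⟨?_, hfoJ.symm, hvIJ.1⟩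
      have := valid_j3 hvIJ
      simp only at this ⊢
      omega
    obtain ⟨t1, t2, hsplitB⟩ := List.append_of_mem hmemB
    have hpwB := pairwise_pairsB s (s.length - 2)
    rw [hsplitB] at hpwB
    have hafterB : ∀ y ∈ t2, J < y.2 :=
      (List.pairwise_cons.mp (List.pairwise_append.mp hpwB).2.1).1
    have hmemB' : ∀ y, y ∈ t1 ∨ y ∈ t2 → ValidP s y := by
      intro y hy
      apply valid_of_mem_pairsB
      rw [hsplitB]
      rcases hy with h | h
      · exact List.mem_append_left _ h
      · exact List.mem_append_right _ (List.mem_cons_of_mem _ h)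
    rw [hsplitB, List.map_append, List.map_cons]
    rw [foldl_stepL_split
      (fun c hc => by
        obtain ⟨y, hy, rfl⟩ := List.mem_map.mp hc
        rw [hlenIJ]
        exact hle y (hmemB' y (Or.inl hy)))
      (by simp)
      (fun c hc => by
        obtain ⟨y, hy, rfl⟩ := List.mem_map.mp hc
        rw [hlenIJ]
        exact hstrictB y (hmemB' y (Or.inr hy)) (hafterB y hy))]

-- ===== VERDICT (by name: the statement is the Claim_ definition above) =====
theorem getEndtoEndLongestString_spec : Claim_equal_getEndtoEndLongestString := by
  intro string _
  unfold Spec_getEndtoEndLongestString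
  rw [A_eq, B_eq, main_eq]
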